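-- pv_equiv track=rewrite | github.com/canonical/cloud-init | cloudinit/config/cc_apt_configure.py | get_arch_mirrorconfig
-- ===== SOURCE A (Python) =====
-- def get_arch_mirrorconfig(cfg, mirrortype, arch):
--     """out of a list of potential mirror configurations select
--     and return the one matching the architecture (or default)"""
--     # select the mirror specification (if-any)
--     mirror_cfg_list = cfg.get(mirrortype, None)
--     if mirror_cfg_list is None:
--         return None
--
--     # select the specification matching the target arch
--     default = None
--     for mirror_cfg_elem in mirror_cfg_list:
--         arches = mirror_cfg_elem.get("arches") or []
--         if arch in arches:
--             return mirror_cfg_elem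
--         if "default" in arches:
--             default = mirror_cfg_elem
--     return default
-- ===== SOURCE B (Python) =====
-- def get_arch_mirrorconfig(cfg, mirrortype, arch):
--     """out of a list of potential mirror configurations select
--     and return the one matching the architecture (or default)"""
--     mirror_cfg_list = cfg.get(mirrortype, None)
--     if mirror_cfg_list is None:
--         return None
--     # first: the element listing the target arch (first match wins)
--     hit = next(
--         (e for e in mirror_cfg_list if arch in (e.get("arches") or [])), None
--     )
--     if hit is not None:
--         return hit
--     # otherwise: the LAST element listing "default" (scan in reverse)
--     return next(
--         (
--             e
--             for e in reversed(mirror_cfg_list)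
--             if "default" in (e.get("arches") or [])
--         ),
--         None,
--     )
-- ===== Notes on version B (the rewrite author's own statement) =====
-- stated objective: alternative
-- what changed: Replaced the single loop carrying a 'default' accumulator by two independent searches: a forward find? for the arch match, and a reverse find? for the last default-bearing element.
import Mathlib
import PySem

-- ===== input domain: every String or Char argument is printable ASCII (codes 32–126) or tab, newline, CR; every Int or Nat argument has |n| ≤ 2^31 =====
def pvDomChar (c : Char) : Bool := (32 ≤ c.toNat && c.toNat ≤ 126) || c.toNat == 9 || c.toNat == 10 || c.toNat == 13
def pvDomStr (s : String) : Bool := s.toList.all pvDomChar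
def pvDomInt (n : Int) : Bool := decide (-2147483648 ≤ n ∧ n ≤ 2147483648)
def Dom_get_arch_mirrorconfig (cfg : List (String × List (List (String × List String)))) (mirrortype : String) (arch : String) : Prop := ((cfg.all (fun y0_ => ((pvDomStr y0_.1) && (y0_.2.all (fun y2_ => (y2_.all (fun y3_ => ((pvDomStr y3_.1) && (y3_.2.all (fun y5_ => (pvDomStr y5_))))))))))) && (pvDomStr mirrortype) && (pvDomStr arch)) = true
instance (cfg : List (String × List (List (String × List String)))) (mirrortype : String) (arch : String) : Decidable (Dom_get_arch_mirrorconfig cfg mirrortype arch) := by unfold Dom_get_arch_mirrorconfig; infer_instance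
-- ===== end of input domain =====

-- B replaces A's single accumulator-carrying loop by two independent searches
-- (forward find? for the arch match, reverse find? for the last default);
-- objective: alternative decomposition, same cost.

-- ===== PORT A =====
-- the loop body of A, carrying the `default` accumulator
def pvALoop (arch : String) : List (List (String × List String)) →
    Option (List (String × List String)) → Option (List (String × List String))
  | [], default => default
  | e :: rest, default =>
    let arches := (PySem.Dict.mk e).getD "arches" []
    if arches.contains arch then some e
    else if arches.contains "default" then pvALoop arch rest (some e)
    else pvALoop arch rest default

def get_arch_mirrorconfig (cfg : List (String × List (List (String × List String)))) (mirrortype : String) (arch : String) : Option (List (String × List String)) :=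
  match (PySem.Dict.mk cfg).get? mirrortype with
  | none => none
  | some mirror_cfg_list => pvALoop arch mirror_cfg_list none

-- ===== PORT B =====
def get_arch_mirrorconfig_alt (cfg : List (String × List (List (String × List String)))) (mirrortype : String) (arch : String) : Option (List (String × List String)) :=
  match (PySem.Dict.mk cfg).get? mirrortype with
  | none => none
  | some mirror_cfg_list =>
    match mirror_cfg_list.find? (fun e => ((PySem.Dict.mk e).getD "arches" []).contains arch) with
    | some hit => some hit
    | none =>
      mirror_cfg_list.reverse.find? (fun e => ((PySem.Dict.mk e).getD "arches" []).contains "default")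

-- ===== PRECONDITION & SPEC =====
def Spec_get_arch_mirrorconfig (cfg : List (String × List (List (String × List String)))) (mirrortype : String) (arch : String) (out : Option (List (String × List String))) : Prop := out = get_arch_mirrorconfig_alt cfg mirrortype arch
instance (cfg : List (String × List (List (String × List String)))) (mirrortype : String) (arch : String) (out : Option (List (String × List String))) : Decidable (Spec_get_arch_mirrorconfig cfg mirrortype arch out) := by unfold Spec_get_arch_mirrorconfig; infer_instance

-- ===== CLAIM (what is proved, stated in full; the proofs are below) =====
def Claim_equal_get_arch_mirrorconfig : Prop := ∀ (cfg : List (String × List (List (String × List String)))) (mirrortype : String) (arch : String), Dom_get_arch_mirrorconfig cfg mirrortype arch → Spec_get_arch_mirrorconfig cfg mirrortype arch (get_arch_mirrorconfig cfg mirrortype arch)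

-- ===== LEMMAS AND PROOFS =====

-- A's loop = forward search for arch, else reverse search for default, else the accumulator
theorem pvALoop_eq (arch : String) (l : List (List (String × List String)))
    (d : Option (List (String × List String))) :
    pvALoop arch l d =
      match l.find? (fun e => ((PySem.Dict.mk e).getD "arches" []).contains arch) with
      | some hit => some hit
      | none =>
        match l.reverse.find? (fun e => ((PySem.Dict.mk e).getD "arches" []).contains "default") with
        | some e => some e
        | none => d := by
  induction l generalizing d with
  | nil => simp [pvALoop]
  | cons e rest ih =>
    simp only [pvALoop, List.reverse_cons, List.find?_append, List.find?_cons]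
    by_cases h1 : arch ∈ (PySem.Dict.mk e).getD "arches" []
    · simp [h1]
    · by_cases h2 : "default" ∈ (PySem.Dict.mk e).getD "arches" [] <;>
        simp only [ih] <;>
        rcases rest.find? (fun e => ((PySem.Dict.mk e).getD "arches" []).contains arch) with _ | hit <;>
        rcases rest.reverse.find? (fun e => ((PySem.Dict.mk e).getD "arches" []).contains "default") with _ | e' <;>
        simp [h1, h2]

-- ===== VERDICT (by name: the statement is the Claim_ definition above) =====
theorem get_arch_mirrorconfig_spec : Claim_equal_get_arch_mirrorconfig := by
  intro cfg mirrortype arch _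
  unfold Spec_get_arch_mirrorconfig get_arch_mirrorconfig get_arch_mirrorconfig_alt
  rcases h : (PySem.Dict.mk cfg).get? mirrortype with _ | l
  · rfl
  · simp only [pvALoop_eq]
    rcases l.find? (fun e => ((PySem.Dict.mk e).getD "arches" []).contains arch) with _ | hit <;>
    rcases l.reverse.find? (fun e => ((PySem.Dict.mk e).getD "arches" []).contains "default") with _ | e <;> rfl
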